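-- pv_equiv track=rewrite | github.com/Boot10it/ADBA_Race_Draw | racedraw 2 - add race result entry.py | get_race_opponents
-- ===== SOURCE A (Python) =====
-- def get_race_opponents(heat):
--     opponents = {}
--     for race in heat:
--         teams_in_race = [team['name'] for team in race if team is not None]
--         for team in teams_in_race:
--             if team not in opponents:
--                 opponents[team] = set()
--             opponents[team].update(t for t in teams_in_race if t != team)
--     return opponents
-- ===== SOURCE B (Python) =====
-- def get_race_opponents(heat):
--     # Gather the name lists once, fix the key order by first appearance,
--     # then build each team's opponent set in a single per-key comprehension.
--     names_by_race = [[team['name'] for team in race if team is not None] for race in heat]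
--     order = list(dict.fromkeys(n for names in names_by_race for n in names))
--     return {n: set(m for names in names_by_race if n in names for m in names if m != n)
--             for n in order}
-- ===== Notes on version B (the rewrite author's own statement) =====
-- stated objective: alternative
-- what changed: A builds the dict incrementally, mutating per-team sets race by race; B is non-mutating: it extracts the name lists once, fixes the key order via dict.fromkeys, and constructs each team's full opponent set in one per-key comprehension over the races that contain it.
import Mathlib
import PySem

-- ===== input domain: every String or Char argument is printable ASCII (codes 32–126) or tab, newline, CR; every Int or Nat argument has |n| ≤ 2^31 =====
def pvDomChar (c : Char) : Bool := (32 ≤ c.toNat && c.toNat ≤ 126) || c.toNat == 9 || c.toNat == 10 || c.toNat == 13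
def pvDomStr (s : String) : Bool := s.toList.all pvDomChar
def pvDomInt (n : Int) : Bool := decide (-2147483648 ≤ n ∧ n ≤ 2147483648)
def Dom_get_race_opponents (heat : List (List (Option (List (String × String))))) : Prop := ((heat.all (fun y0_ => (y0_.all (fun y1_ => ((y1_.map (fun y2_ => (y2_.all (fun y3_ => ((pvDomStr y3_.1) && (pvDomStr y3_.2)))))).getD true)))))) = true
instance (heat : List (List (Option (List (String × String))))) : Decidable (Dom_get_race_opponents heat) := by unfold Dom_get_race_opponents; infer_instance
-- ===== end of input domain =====

-- B replaces A's incremental per-race mutation of the sets by a non-mutating per-key build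
-- (fix the key order first, then construct each team's full opponent set in one comprehension);
-- objective: alternative decomposition, no speed claim.

-- ===== PORT A =====
-- shared comprehension: [team['name'] for team in race if team is not None]
-- (team['name'] = first-match lookup in the association list, per the type convention)
def pvRaceNames (race : List (Option (List (String × String)))) : List String :=
  (race.filterMap id).map (fun team => (List.lookup "name" team).getD "")

def get_race_opponents (heat : List (List (Option (List (String × String))))) : List (String × List String) :=
  (heat.foldl (fun opponents race =>
      let teams_in_race := pvRaceNames race
      teams_in_race.foldl (fun opponents team =>
        let opponents := if opponents.contains team then opponents
                         else opponents.insert team PySem.Set.empty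
        opponents.modify team PySem.Set.empty
          (fun s => PySem.Set.update s (teams_in_race.filter (fun t => t != team))))
        opponents)
    PySem.Dict.empty).items

-- ===== PORT B =====
def get_race_opponents_alt (heat : List (List (Option (List (String × String))))) : List (String × List String) :=
  let namesByRace := heat.map pvRaceNames
  let order := PySem.List.dedup namesByRace.flatten
  -- dict comprehension over the (distinct) keys of `order`
  (order.foldl (fun d n =>
      d.insert n (PySem.Set.ofList
        (((namesByRace.filter (fun names => names.contains n)).map
            (fun names => names.filter (fun m => m != n))).flatten)))
    PySem.Dict.empty).items

-- ===== PRECONDITION & SPEC =====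
-- Pre_ excludes exactly the inputs where A raises KeyError: a non-None team dict without a "name" key.
def Pre_get_race_opponents (heat : List (List (Option (List (String × String))))) : Prop :=
  (heat.all (fun race => race.all (fun t =>
    (t.map (fun team => (List.lookup "name" team).isSome)).getD true))) = true
instance (heat : List (List (Option (List (String × String))))) : Decidable (Pre_get_race_opponents heat) := by unfold Pre_get_race_opponents; infer_instance

def pvWitness_get_race_opponents : (List (List (Option (List (String × String))))) :=
  [[some [("name", "a")], some [("name", "b")], none], [some [("name", "a")]]]

def Spec_get_race_opponents (heat : List (List (Option (List (String × String))))) (out : List (String × List String)) : Prop := out = get_race_opponents_alt heat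
instance (heat : List (List (Option (List (String × String))))) (out : List (String × List String)) : Decidable (Spec_get_race_opponents heat out) := by unfold Spec_get_race_opponents; infer_instance

-- ===== CLAIM (what is proved, stated in full; the proofs are below) =====
def Claim_equal_get_race_opponents : Prop := ∀ (heat : List (List (Option (List (String × String))))), Dom_get_race_opponents heat → Pre_get_race_opponents heat → Spec_get_race_opponents heat (get_race_opponents heat)

-- ===== LEMMAS AND PROOFS =====

-- A's per-race inner loop, rewritten over an explicit sublist (filter still over the full list)
def pvStepOn (teams sub : List String) (d : PySem.Dict String (PySem.Set String)) :
    PySem.Dict String (PySem.Set String) :=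
  sub.foldl (fun d t => d.modify t PySem.Set.empty
    (fun s => PySem.Set.update s (teams.filter (fun x => x != t)))) d

lemma pvIf_modify (d : PySem.Dict String (PySem.Set String)) (t : String)
    (g : PySem.Set String → PySem.Set String) :
    (if d.contains t then d else d.insert t PySem.Set.empty).modify t PySem.Set.empty g
      = d.modify t PySem.Set.empty g := by
  by_cases h : d.contains t
  · simp [h]
  · have hc : d.contains t = false := by simpa using h
    simp [PySem.Dict.modify, PySem.Dict.getD_insert_self, PySem.Dict.insert_insert_self,
      PySem.Dict.getD_of_not_contains, hc]

lemma pvStepA_eq (teams : List String) (d : PySem.Dict String (PySem.Set String)) :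
    List.foldl (fun opponents team =>
        let opponents := if opponents.contains team then opponents
                         else opponents.insert team PySem.Set.empty
        opponents.modify team PySem.Set.empty
          (fun s => PySem.Set.update s (teams.filter (fun t => t != team)))) d teams
      = pvStepOn teams teams d := by
  unfold pvStepOn
  congr 1
  funext o t
  exact pvIf_modify o t _

lemma pvMem_update {s : PySem.Set String} {l : List String} {y : String} :
    y ∈ PySem.Set.update s l ↔ y ∈ s ∨ y ∈ l := by
  induction l generalizing s with
  | nil => simp [PySem.Set.update]
  | cons x xs ih =>
      simp only [PySem.Set.update, List.foldl_cons] at *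
      rw [ih]
      simp [PySem.Set.mem_add, or_assoc]

lemma pvUpdate_absorb {s : PySem.Set String} {l : List String} (h : ∀ x ∈ l, x ∈ s) :
    PySem.Set.update s l = s := by
  induction l generalizing s with
  | nil => rfl
  | cons x xs ih =>
      simp only [PySem.Set.update, List.foldl_cons]
      have hx : x ∈ s := h x (by simp)
      have : PySem.Set.add s x = s := by
        simp [PySem.Set.add, hx]
      rw [this]
      exact ih (fun y hy => h y (by simp [hy]))

lemma pvUpdate_update (s : PySem.Set String) (l : List String) :
    PySem.Set.update (PySem.Set.update s l) l = PySem.Set.update s l :=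
  pvUpdate_absorb (fun _ hx => pvMem_update.mpr (Or.inr hx))

lemma pvOfList_append (xs l : List String) :
    PySem.Set.ofList (xs ++ l) = PySem.Set.update (PySem.Set.ofList xs) l := by
  simp [PySem.Set.ofList_eq_foldl, PySem.Set.update, List.foldl_append]

lemma pvStepOn_getD (teams : List String) (sub : List String)
    (d : PySem.Dict String (PySem.Set String)) (n : String) :
    (pvStepOn teams sub d).getD n PySem.Set.empty =
      if n ∈ sub then
        PySem.Set.update (d.getD n PySem.Set.empty) (teams.filter (fun x => x != n))
      else d.getD n PySem.Set.empty := by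
  induction sub generalizing d with
  | nil => simp [pvStepOn]
  | cons hd tl ih =>
      simp only [pvStepOn, List.foldl_cons] at *
      rw [ih]
      by_cases hhd : n = hd
      · subst hhd
        by_cases htl : n ∈ tl
        · simp [htl, pvUpdate_update]
        · simp [htl]
      · by_cases htl : n ∈ tl
        · simp [htl, hhd, PySem.Dict.getD_modify]
        · simp [htl, hhd, PySem.Dict.getD_modify]

lemma pvStepOn_keys (teams sub : List String) (d : PySem.Dict String (PySem.Set String)) :
    (pvStepOn teams sub d).keys = PySem.Set.update d.keys sub := by
  unfold pvStepOn
  exact PySem.Dict.keys_foldl_modify sub PySem.Set.empty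
    (fun _ t => fun s => PySem.Set.update s (teams.filter (fun x => x != t))) d

-- the invariant carried through A's outer loop, stated over the per-race name lists
lemma pvFold_inv (N : List (List String)) :
    (N.foldl (fun d teams => pvStepOn teams teams d) PySem.Dict.empty).keys
        = PySem.Set.ofList N.flatten ∧
    ∀ n, (N.foldl (fun d teams => pvStepOn teams teams d) PySem.Dict.empty).getD n PySem.Set.empty
        = PySem.Set.ofList (((N.filter (fun r => r.contains n)).map
            (fun r => r.filter (fun m => m != n))).flatten) := by
  induction N using List.reverseRecOn with
  | nil =>
      refine ⟨by simp [PySem.Dict.keys_empty, PySem.Set.ofList_eq_foldl],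
              fun n => by simp [PySem.Dict.getD_empty, PySem.Set.ofList_eq_foldl]⟩
  | append_singleton M r ih =>
      obtain ⟨hk, hg⟩ := ih
      rw [List.foldl_append]
      constructor
      · rw [List.foldl_cons, List.foldl_nil, pvStepOn_keys, hk, ← pvOfList_append]
        simp
      · intro n
        rw [List.foldl_cons, List.foldl_nil, pvStepOn_getD, hg]
        by_cases hn : n ∈ r
        · rw [if_pos hn, ← pvOfList_append]
          have hc : r.contains n = true := List.contains_iff_mem.mpr hn
          rw [List.filter_append, List.filter_cons, hc]
          simp
        · rw [if_neg hn]
          have hc : r.contains n = false := by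
            simpa using hn
          rw [List.filter_append, List.filter_cons, hc]
          simp

lemma pvNodup_keys (N : List (List String)) :
    (N.foldl (fun d teams => pvStepOn teams teams d) PySem.Dict.empty).keys.Nodup := by
  rw [(pvFold_inv N).1]
  exact PySem.Set.nodup_ofList _

-- ===== VERDICT (by name: the statement is the Claim_ definition above) =====
theorem get_race_opponents_spec : Claim_equal_get_race_opponents := by
  intro heat _ _
  unfold Spec_get_race_opponents get_race_opponents get_race_opponents_alt
  -- rewrite A's inner loop and push the outer fold through the map to name lists
  simp only [pvStepA_eq]
  rw [show (heat.foldl (fun d race => pvStepOn (pvRaceNames race) (pvRaceNames race) d) PySem.Dict.empty)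
      = ((heat.map pvRaceNames).foldl (fun d teams => pvStepOn teams teams d) PySem.Dict.empty) by
    rw [List.foldl_map]]
  obtain ⟨hk, hg⟩ := pvFold_inv (heat.map pvRaceNames)
  rw [PySem.Dict.items_eq_map_keys _ (pvNodup_keys (heat.map pvRaceNames)) PySem.Set.empty, hk]
  rw [PySem.Dict.items_foldl_insert_fresh _ (fun n => n) _ _
      (fun a _ => PySem.Dict.contains_empty a)
      (by simp [PySem.List.dedup_eq_ofList, PySem.Set.nodup_ofList])]
  simp only [PySem.List.dedup_eq_ofList]
  have hempty : (PySem.Dict.empty : PySem.Dict String (PySem.Set String)).items = [] := rfl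
  rw [hempty, List.nil_append]
  exact List.map_congr_left (fun n _ => by rw [hg n])
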